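-- pv_equiv track=rewrite | github.com/824zzy/Leetcode | L_Stack/MonotonicStack/L1_1909_Remove_One_Element_to_Make_the_Array_Strictly_Increasing.py | canBeIncreasing
-- ===== SOURCE A (Python) =====
-- from typing import List
--
-- def canBeIncreasing(A: List[int]) -> bool:
--     dec1 = 0
--     stk = []
--     for i in range(len(A)):
--         while stk and A[stk[-1]] >= A[i]:
--             stk.pop()
--             dec1 += 1
--         stk.append(i)
--
--     dec2 = 0
--     stk = []
--     for i in reversed(range(len(A))):
--         while stk and A[stk[-1]] <= A[i]:
--             stk.pop()
--             dec2 += 1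
--         stk.append(i)
--     return min(dec1, dec2) <= 1
-- ===== SOURCE B (Python) =====
-- from typing import List
--
-- def canBeIncreasing(A: List[int]) -> bool:
--     # Single pass: collect the indices of adjacent non-increases; with none the
--     # array is already strictly increasing, with two or more one removal cannot
--     # help, and with exactly one, removing A[i-1] or A[i] must bridge the gap.
--     n = len(A)
--     bad = [i for i in range(1, n) if A[i - 1] >= A[i]]
--     if not bad:
--         return True
--     if len(bad) > 1:
--         return False
--     i = bad[0]
--     return i == 1 or A[i - 2] < A[i] or i == n - 1 or A[i - 1] < A[i + 1]
-- ===== Notes on version B (the rewrite author's own statement) =====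
-- stated objective: simpler
-- what changed: Replaces the two monotonic-stack passes (counting pops forward and backward) by one scan that collects the adjacent non-increase positions and, for a single such position, checks the two O(1) bridge conditions.
import Mathlib
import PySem

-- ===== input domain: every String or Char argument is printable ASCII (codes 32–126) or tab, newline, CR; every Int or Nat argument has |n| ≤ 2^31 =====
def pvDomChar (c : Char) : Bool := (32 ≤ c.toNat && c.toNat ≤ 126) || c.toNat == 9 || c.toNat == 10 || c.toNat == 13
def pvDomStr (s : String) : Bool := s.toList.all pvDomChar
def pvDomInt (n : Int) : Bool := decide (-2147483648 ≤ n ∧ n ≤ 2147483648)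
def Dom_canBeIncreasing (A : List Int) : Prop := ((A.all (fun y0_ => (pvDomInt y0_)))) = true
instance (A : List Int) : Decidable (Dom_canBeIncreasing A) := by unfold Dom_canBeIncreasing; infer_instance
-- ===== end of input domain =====

-- B replaces A's two monotonic-stack passes by one scan over the adjacent non-increase
-- positions plus two O(1) bridge checks (objective: simpler; same asymptotic cost).

-- ===== PORT A =====
-- the inner `while stk and A[stk[-1]] >= A[i]` loop of the first pass (stack of indices, head = top)
def pvPopGe (A : List Int) (x : Int) : List Nat → Int → List Nat × Int
  | [], d => ([], d)
  | t :: r, d => if x ≤ A.getD t 0 then pvPopGe A x r (d + 1) else (t :: r, d)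

-- the inner `while stk and A[stk[-1]] <= A[i]` loop of the second pass
def pvPopLe (A : List Int) (x : Int) : List Nat → Int → List Nat × Int
  | [], d => ([], d)
  | t :: r, d => if A.getD t 0 ≤ x then pvPopLe A x r (d + 1) else (t :: r, d)

-- indices pushed on the stacks come from range(len(A)), so A[·] is fetched with getD (always in range)
def canBeIncreasing (A : List Int) : Bool :=
  let dec1 := ((List.range A.length).foldl
    (fun (sd : List Nat × Int) i =>
      ((i :: (pvPopGe A (A.getD i 0) sd.1 sd.2).1), (pvPopGe A (A.getD i 0) sd.1 sd.2).2))
    ([], 0)).2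
  let dec2 := ((List.range A.length).reverse.foldl
    (fun (sd : List Nat × Int) i =>
      ((i :: (pvPopLe A (A.getD i 0) sd.1 sd.2).1), (pvPopLe A (A.getD i 0) sd.1 sd.2).2))
    ([], 0)).2
  decide (min dec1 dec2 ≤ 1)

-- ===== PORT B =====
def canBeIncreasing_alt (A : List Int) : Bool :=
  match (List.range' 1 (A.length - 1)).filter
      (fun i => decide (A.getD i 0 ≤ A.getD (i - 1) 0)) with
  | [] => true
  | [i] => decide (i = 1) || decide (A.getD (i - 2) 0 < A.getD i 0)
        || decide (i = A.length - 1) || decide (A.getD (i - 1) 0 < A.getD (i + 1) 0)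
  | _ :: _ :: _ => false

-- ===== PRECONDITION & SPEC =====
def Spec_canBeIncreasing (A : List Int) (out : Bool) : Prop := out = canBeIncreasing_alt A
instance (A : List Int) (out : Bool) : Decidable (Spec_canBeIncreasing A out) := by unfold Spec_canBeIncreasing; infer_instance

-- ===== CLAIM (what is proved, stated in full; the proofs are below) =====
def Claim_equal_canBeIncreasing : Prop := ∀ (A : List Int), Dom_canBeIncreasing A → Spec_canBeIncreasing A (canBeIncreasing A)

-- ===== LEMMAS AND PROOFS =====

-- value-level model of the two passes (stack of VALUES; c top x = pop condition)
def pvPops (c : Int → Int → Bool) (x : Int) : List Int → Int → List Int × Int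
  | [], d => ([], d)
  | t :: r, d => if c t x then pvPops c x r (d + 1) else (t :: r, d)

def pvPass (c : Int → Int → Bool) : List Int → List Int → Int → List Int × Int
  | [], s, d => (s, d)
  | x :: L, s, d => pvPass c L (x :: (pvPops c x s d).1) (pvPops c x s d).2

def cF : Int → Int → Bool := fun t x => decide (x ≤ t)
def cB : Int → Int → Bool := fun t x => decide (t ≤ x)

-- number of adjacent pairs satisfying the pop condition
def vcnt (c : Int → Int → Bool) : List Int → Nat
  | a :: b :: r => (if c a b then 1 else 0) + vcnt c (b :: r)
  | _ => 0

-- ---- simulation: index stacks ↦ value stacks ----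

lemma popGe_sim (A : List Int) (x : Int) : ∀ (s : List Nat) (d : Int),
    pvPops cF x (s.map (fun i => A.getD i 0)) d
      = ((pvPopGe A x s d).1.map (fun i => A.getD i 0), (pvPopGe A x s d).2) := by
  intro s
  induction s with
  | nil => intro d; simp [pvPops, pvPopGe]
  | cons t r ih =>
    intro d
    simp only [List.map_cons, pvPops, pvPopGe, cF, decide_eq_true_eq]
    by_cases h : x ≤ A.getD t 0
    · rw [if_pos h, if_pos h, ih]
    · rw [if_neg h, if_neg h]; simp

lemma popLe_sim (A : List Int) (x : Int) : ∀ (s : List Nat) (d : Int),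
    pvPops cB x (s.map (fun i => A.getD i 0)) d
      = ((pvPopLe A x s d).1.map (fun i => A.getD i 0), (pvPopLe A x s d).2) := by
  intro s
  induction s with
  | nil => intro d; simp [pvPops, pvPopLe]
  | cons t r ih =>
    intro d
    simp only [List.map_cons, pvPops, pvPopLe, cB, decide_eq_true_eq]
    by_cases h : A.getD t 0 ≤ x
    · rw [if_pos h, if_pos h, ih]
    · rw [if_neg h, if_neg h]; simp

lemma foldF_sim (A : List Int) : ∀ (I : List Nat) (s : List Nat) (d : Int),
    (I.foldl (fun (sd : List Nat × Int) i =>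
        ((i :: (pvPopGe A (A.getD i 0) sd.1 sd.2).1), (pvPopGe A (A.getD i 0) sd.1 sd.2).2)) (s, d)).2
      = (pvPass cF (I.map (fun i => A.getD i 0)) (s.map (fun i => A.getD i 0)) d).2 := by
  intro I
  induction I with
  | nil => intro s d; simp [pvPass]
  | cons i I ih =>
    intro s d
    simp only [List.foldl_cons, List.map_cons, pvPass, popGe_sim]
    exact ih _ _

lemma foldB_sim (A : List Int) : ∀ (I : List Nat) (s : List Nat) (d : Int),
    (I.foldl (fun (sd : List Nat × Int) i =>
        ((i :: (pvPopLe A (A.getD i 0) sd.1 sd.2).1), (pvPopLe A (A.getD i 0) sd.1 sd.2).2)) (s, d)).2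
      = (pvPass cB (I.map (fun i => A.getD i 0)) (s.map (fun i => A.getD i 0)) d).2 := by
  intro I
  induction I with
  | nil => intro s d; simp [pvPass]
  | cons i I ih =>
    intro s d
    simp only [List.foldl_cons, List.map_cons, pvPass, popLe_sim]
    exact ih _ _

lemma range_map_getD (A : List Int) : (List.range A.length).map (fun i => A.getD i 0) = A := by
  apply List.ext_getElem
  · simp
  · intro k h1 h2
    simp [List.getElem?_eq_getElem h2]

lemma portA_eq (A : List Int) :
    canBeIncreasing A
      = decide (min (pvPass cF A [] 0).2 (pvPass cB A.reverse [] 0).2 ≤ 1) := by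
  show decide _ = _
  rw [foldF_sim, foldB_sim, List.map_reverse, range_map_getD]
  simp

-- ---- basic pass lemmas ----

lemma pops_ge (c : Int → Int → Bool) (x : Int) : ∀ (s : List Int) (d : Int),
    d ≤ (pvPops c x s d).2 := by
  intro s
  induction s with
  | nil => intro d; simp [pvPops]
  | cons t r ih =>
    intro d
    by_cases h : c t x
    · simp only [pvPops, h, if_true]
      have := ih (d + 1); omega
    · simp [pvPops, h]

lemma pass_ge (c : Int → Int → Bool) : ∀ (L : List Int) (s : List Int) (d : Int),
    d ≤ (pvPass c L s d).2 := by
  intro L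
  induction L with
  | nil => intro s d; simp [pvPass]
  | cons x L ih =>
    intro s d
    have h1 := pops_ge c x s d
    have h2 := ih (x :: (pvPops c x s d).1) (pvPops c x s d).2
    simp only [pvPass]
    omega

lemma pass_no_pops (c : Int → Int → Bool) : ∀ (L : List Int) (x : Int) (s : List Int) (d : Int),
    List.IsChain (fun a b => c a b = false) (x :: L) →
    pvPass c L (x :: s) d = (L.reverse ++ x :: s, d) := by
  intro L
  induction L with
  | nil => intro x s d _; simp [pvPass]
  | cons y L ih =>
    intro x s d h
    rw [List.isChain_cons_cons] at h
    obtain ⟨hxy, hyl⟩ := h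
    simp only [pvPass, pvPops, hxy, Bool.false_eq_true, if_false]
    rw [ih y (x :: s) d hyl]
    simp

lemma pass_chain (c : Int → Int → Bool) (L : List Int) (d : Int)
    (h : List.IsChain (fun a b => c a b = false) L) :
    pvPass c L [] d = (L.reverse, d) := by
  cases L with
  | nil => simp [pvPass]
  | cons x L =>
    simp only [pvPass, pvPops]
    rw [pass_no_pops c L x [] d h]
    simp

lemma pass_append (c : Int → Int → Bool) : ∀ (L1 L2 s : List Int) (d : Int),
    pvPass c (L1 ++ L2) s d = pvPass c L2 (pvPass c L1 s d).1 (pvPass c L1 s d).2 := by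
  intro L1
  induction L1 with
  | nil => intro L2 s d; simp [pvPass]
  | cons x L1 ih =>
    intro L2 s d
    simp only [List.cons_append, pvPass]
    exact ih _ _ _

-- ---- pop count is at least the number of adjacent violations ----

lemma pass_cnt (c : Int → Int → Bool) : ∀ (L : List Int) (x : Int) (s : List Int) (d : Int),
    d + (vcnt c (x :: L) : Int) ≤ (pvPass c L (x :: s) d).2 := by
  intro L
  induction L with
  | nil => intro x s d; simp [pvPass, vcnt]
  | cons y L ih =>
    intro x s d
    by_cases h : c x y
    · have hge : d + 1 ≤ (pvPops c y (x :: s) d).2 := by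
        simp only [pvPops, h, if_true]
        exact pops_ge c y s (d + 1)
      have ihy := ih y (pvPops c y (x :: s) d).1 (pvPops c y (x :: s) d).2
      simp only [pvPass]
      simp only [vcnt, h, if_true] at *
      push_cast at *
      omega
    · have hpops : pvPops c y (x :: s) d = (x :: s, d) := by simp [pvPops, h]
      have ihy := ih y (x :: s) d
      simp only [pvPass, hpops]
      simp only [vcnt, h, if_false] at *
      push_cast at *
      omega

lemma pass_ge_vcnt (c : Int → Int → Bool) (A : List Int) :
    (vcnt c A : Int) ≤ (pvPass c A [] 0).2 := by
  cases A with
  | nil => simp [pvPass, vcnt]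
  | cons x L =>
    have h := pass_cnt c L x [] 0
    simp only [pvPass, pvPops] at *
    omega

-- ---- vcnt and two violations ----

lemma vcnt_cons_ge (c : Int → Int → Bool) (x : Int) (M : List Int) :
    vcnt c M ≤ vcnt c (x :: M) := by
  cases M with
  | nil => simp [vcnt]
  | cons y M => simp only [vcnt]; omega

lemma vcnt_drop_succ_le (c : Int → Int → Bool) (L : List Int) (m : Nat) :
    vcnt c (L.drop (m + 1)) ≤ vcnt c (L.drop m) := by
  rw [← List.tail_drop]
  cases h : L.drop m with
  | nil => simp [vcnt]
  | cons y M => simpa using vcnt_cons_ge c y M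

lemma vcnt_drop_mono (c : Int → Int → Bool) (L : List Int) :
    ∀ {m m' : Nat}, m ≤ m' → vcnt c (L.drop m') ≤ vcnt c (L.drop m) := by
  intro m m' h
  induction m' with
  | zero => simp_all
  | succ k ih =>
    rcases Nat.lt_or_ge m (k + 1) with hlt | hge
    · exact le_trans (vcnt_drop_succ_le c L k) (ih (by omega))
    · have : m = k + 1 := by omega
      subst this; exact le_refl _

lemma vcnt_viol (c : Int → Int → Bool) (L : List Int) (k : Nat) (h : k + 1 < L.length)
    (hc : c (L[k]'(by omega)) (L[k + 1]'h) = true) :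
    1 + vcnt c (L.drop (k + 1)) ≤ vcnt c (L.drop k) := by
  have e1 : L.drop k = L[k]'(by omega) :: L.drop (k + 1) :=
    List.drop_eq_getElem_cons (by omega)
  have e2 : L.drop (k + 1) = L[k + 1]'h :: L.drop (k + 2) :=
    List.drop_eq_getElem_cons h
  rw [e1, e2]
  simp [vcnt, hc]

lemma vcnt_two (c : Int → Int → Bool) (L : List Int) (k1 k2 : Nat)
    (h1 : k1 + 1 < L.length) (h2 : k2 + 1 < L.length) (hk : k1 < k2)
    (hc1 : c (L[k1]'(by omega)) (L[k1 + 1]'h1) = true)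
    (hc2 : c (L[k2]'(by omega)) (L[k2 + 1]'h2) = true) :
    2 ≤ vcnt c L := by
  have a1 := vcnt_viol c L k1 h1 hc1
  have a2 := vcnt_viol c L k2 h2 hc2
  have a3 := vcnt_drop_mono c L (show k1 + 1 ≤ k2 by omega)
  have a4 : vcnt c (L.drop k1) ≤ vcnt c L := by
    have := vcnt_drop_mono c L (show 0 ≤ k1 by omega)
    simpa using this
  omega

-- ---- the three key computations ----

lemma key_one_a (c : Int → Int → Bool) (p x : Int) (S : List Int)
    (hpx : c p x = true) (hxS : List.IsChain (fun a b => c a b = false) (x :: S)) :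
    (pvPass c (p :: x :: S) [] 0).2 = 1 := by
  have : pvPass c (p :: x :: S) [] 0 = pvPass c S (x :: []) 1 := by
    simp [pvPass, pvPops, hpx]
  rw [this, pass_no_pops c S x [] 1 hxS]

lemma key_one_b (c : Int → Int → Bool) (Q : List Int) (q p x : Int) (S : List Int)
    (hP : List.IsChain (fun a b => c a b = false) (Q ++ [q, p]))
    (hpx : c p x = true) (hqx : c q x = false)
    (hxS : List.IsChain (fun a b => c a b = false) (x :: S)) :
    (pvPass c ((Q ++ [q, p]) ++ x :: S) [] 0).2 = 1 := by
  rw [pass_append, pass_chain c _ 0 hP]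
  have hrev : (Q ++ [q, p]).reverse = p :: q :: Q.reverse := by simp
  rw [hrev]
  have : pvPass c (x :: S) (p :: q :: Q.reverse) 0 = pvPass c S (x :: q :: Q.reverse) 1 := by
    simp [pvPass, pvPops, hpx, hqx]
  rw [this, pass_no_pops c S x (q :: Q.reverse) 1 hxS]

lemma key_two (c : Int → Int → Bool) (Q : List Int) (q p x : Int) (S : List Int)
    (hP : List.IsChain (fun a b => c a b = false) (Q ++ [q, p]))
    (hpx : c p x = true) (hqx : c q x = true) :
    2 ≤ (pvPass c ((Q ++ [q, p]) ++ x :: S) [] 0).2 := by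
  rw [pass_append, pass_chain c _ 0 hP]
  have hrev : (Q ++ [q, p]).reverse = p :: q :: Q.reverse := by simp
  rw [hrev]
  have e : pvPass c (x :: S) (p :: q :: Q.reverse) 0
      = pvPass c S (x :: (pvPops c x Q.reverse 2).1) (pvPops c x Q.reverse 2).2 := by
    simp [pvPass, pvPops, hpx, hqx]
  rw [e]
  have g1 := pops_ge c x Q.reverse 2
  have g2 := pass_ge c S (x :: (pvPops c x Q.reverse 2).1) (pvPops c x Q.reverse 2).2
  omega

-- ---- the violation list of port B ----

def pvBad (A : List Int) : List Nat :=
  (List.range' 1 (A.length - 1)).filter (fun i => decide (A.getD i 0 ≤ A.getD (i - 1) 0))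

lemma mem_pvBad (A : List Int) (j : Nat) :
    j ∈ pvBad A ↔ (1 ≤ j ∧ j < A.length ∧ A.getD j 0 ≤ A.getD (j - 1) 0) := by
  unfold pvBad
  rw [List.mem_filter, List.mem_range'_1, decide_eq_true_eq]
  constructor
  · rintro ⟨⟨h1, h2⟩, h3⟩; exact ⟨h1, by omega, h3⟩
  · rintro ⟨h1, h2, h3⟩; exact ⟨⟨h1, by omega⟩, h3⟩

lemma nodup_pvBad (A : List Int) : (pvBad A).Nodup :=
  (List.nodup_range' 1 (by norm_num)).filter _

lemma alt_of_nil (A : List Int) (h : pvBad A = []) : canBeIncreasing_alt A = true := by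
  unfold canBeIncreasing_alt
  unfold pvBad at h
  rw [h]

lemma alt_of_single (A : List Int) (i : Nat) (h : pvBad A = [i]) :
    canBeIncreasing_alt A
      = (decide (i = 1) || decide (A.getD (i - 2) 0 < A.getD i 0)
          || decide (i = A.length - 1) || decide (A.getD (i - 1) 0 < A.getD (i + 1) 0)) := by
  unfold canBeIncreasing_alt
  unfold pvBad at h
  rw [h]

lemma alt_of_two (A : List Int) (i j : Nat) (t : List Nat) (h : pvBad A = i :: j :: t) :
    canBeIncreasing_alt A = false := by
  unfold canBeIncreasing_alt
  unfold pvBad at h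
  rw [h]

-- ---- case: no adjacent non-increase ----

lemma case_nil (A : List Int) (h : pvBad A = []) :
    canBeIncreasing A = canBeIncreasing_alt A := by
  rw [portA_eq, alt_of_nil A h]
  have hall : ∀ j : Nat, 1 ≤ j → j < A.length → ¬(A.getD j 0 ≤ A.getD (j - 1) 0) := by
    intro j h1 h2 hle
    have : j ∈ pvBad A := (mem_pvBad A j).mpr ⟨h1, h2, hle⟩
    rw [h] at this
    simp at this
  have hchain : List.IsChain (fun a b => cF a b = false) A := by
    rw [List.isChain_iff_getElem]
    intro k hk
    have hg := hall (k + 1) (by omega) (by omega)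
    rw [List.getD_eq_getElem A 0 hk, List.getD_eq_getElem A 0 (by omega : k + 1 - 1 < A.length)] at hg
    simp only [Nat.add_sub_cancel] at hg
    exact decide_eq_false hg
  have hd1 : (pvPass cF A [] 0).2 = 0 := by rw [pass_chain cF A 0 hchain]
  have hmin : min (pvPass cF A [] 0).2 (pvPass cB A.reverse [] 0).2 ≤ 1 := by
    calc min (pvPass cF A [] 0).2 (pvPass cB A.reverse [] 0).2
        ≤ (pvPass cF A [] 0).2 := min_le_left _ _
      _ ≤ 1 := by rw [hd1]; norm_num
  exact decide_eq_true hmin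

-- ---- case: at least two adjacent non-increases ----

lemma viol_fwd (A : List Int) (i : Nat) (h1 : 1 ≤ i) (h2 : i < A.length)
    (hv : A.getD i 0 ≤ A.getD (i - 1) 0) :
    cF (A[i - 1]'(by omega)) (A[(i - 1) + 1]'(by omega)) = true := by
  have e : i - 1 + 1 = i := by omega
  simp only [e]
  rw [List.getD_eq_getElem A 0 h2, List.getD_eq_getElem A 0 (by omega : i - 1 < A.length)] at hv
  exact decide_eq_true hv

lemma viol_bwd (A : List Int) (i : Nat) (h1 : 1 ≤ i) (h2 : i < A.length)
    (hv : A.getD i 0 ≤ A.getD (i - 1) 0) :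
    cB (A.reverse[A.length - 1 - i]'(by simp; omega))
       (A.reverse[(A.length - 1 - i) + 1]'(by simp; omega)) = true := by
  rw [List.getElem_reverse, List.getElem_reverse]
  have e1 : A.length - 1 - (A.length - 1 - i) = i := by omega
  have e2 : A.length - 1 - (A.length - 1 - i + 1) = i - 1 := by omega
  simp only [e1, e2]
  rw [List.getD_eq_getElem A 0 h2, List.getD_eq_getElem A 0 (by omega : i - 1 < A.length)] at hv
  exact decide_eq_true hv

lemma case_two (A : List Int) (i j : Nat) (t : List Nat) (h : pvBad A = i :: j :: t) :
    canBeIncreasing A = canBeIncreasing_alt A := by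
  rw [portA_eq, alt_of_two A i j t h]
  have hnd := nodup_pvBad A
  rw [h] at hnd
  have hij : i ≠ j := by
    intro he; subst he; simp at hnd
  have hi := (mem_pvBad A i).mp (by rw [h]; exact List.mem_cons_self ..)
  have hj := (mem_pvBad A j).mp (by rw [h]; exact List.mem_cons_of_mem _ (List.mem_cons_self ..))
  obtain ⟨hi1, hin, hiv⟩ := hi
  obtain ⟨hj1, hjn, hjv⟩ := hj
  have hv1 : 2 ≤ vcnt cF A := by
    rcases Nat.lt_or_ge i j with hlt | hge
    · exact vcnt_two cF A (i - 1) (j - 1) (by omega) (by omega) (by omega)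
        (viol_fwd A i hi1 hin hiv) (viol_fwd A j hj1 hjn hjv)
    · have hlt : j < i := by omega
      exact vcnt_two cF A (j - 1) (i - 1) (by omega) (by omega) (by omega)
        (viol_fwd A j hj1 hjn hjv) (viol_fwd A i hi1 hin hiv)
  have hv2 : 2 ≤ vcnt cB A.reverse := by
    rcases Nat.lt_or_ge i j with hlt | hge
    · exact vcnt_two cB A.reverse (A.length - 1 - j) (A.length - 1 - i)
        (by simp; omega) (by simp; omega) (by omega)
        (viol_bwd A j hj1 hjn hjv) (viol_bwd A i hi1 hin hiv)
    · exact vcnt_two cB A.reverse (A.length - 1 - i) (A.length - 1 - j)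
        (by simp; omega) (by simp; omega) (by omega)
        (viol_bwd A i hi1 hin hiv) (viol_bwd A j hj1 hjn hjv)
  have g1 := pass_ge_vcnt cF A
  have g2 := pass_ge_vcnt cB A.reverse
  have hmin : ¬ (min (pvPass cF A [] 0).2 (pvPass cB A.reverse [] 0).2 ≤ 1) := by
    rw [not_le]
    exact lt_min (by push_cast at g1 ⊢; omega) (by push_cast at g2 ⊢; omega)
  exact decide_eq_false hmin

-- ---- case: exactly one adjacent non-increase ----

lemma chainB_rev (L : List Int) :
    List.IsChain (fun a b => cB a b = false) L.reverse ↔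
      List.IsChain (fun a b => cF a b = false) L := by
  rw [List.isChain_reverse]
  exact Iff.rfl

lemma case_single (A : List Int) (i : Nat) (h : pvBad A = [i]) :
    canBeIncreasing A = canBeIncreasing_alt A := by
  rw [portA_eq, alt_of_single A i h]
  obtain ⟨hi1, hin, hiv⟩ := (mem_pvBad A i).mp (by rw [h]; exact List.mem_cons_self ..)
  have huniq : ∀ j : Nat, 1 ≤ j → j < A.length → A.getD j 0 ≤ A.getD (j - 1) 0 → j = i := by
    intro j h1 h2 h3
    have : j ∈ pvBad A := (mem_pvBad A j).mpr ⟨h1, h2, h3⟩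
    rw [h] at this; simpa using this
  have hi1n : i - 1 < A.length := by omega
  have hi2n : i - 2 < A.length := by omega
  -- adjacent pairs other than (i-1, i) strictly increase
  have hgood : ∀ k : Nat, (hk : k + 1 < A.length) → k + 1 ≠ i →
      cF (A[k]'(by omega)) (A[k + 1]'hk) = false := by
    intro k hk hne
    apply decide_eq_false
    intro hle
    apply hne
    apply huniq (k + 1) (by omega) hk
    rw [List.getD_eq_getElem A 0 hk, List.getD_eq_getElem A 0 (by omega : k + 1 - 1 < A.length)]
    simpa using hle
  have chain_take : List.IsChain (fun a b => cF a b = false) (A.take i) := by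
    rw [List.isChain_iff_getElem]
    intro k hk
    have hk' : k + 1 < i := by simp at hk; omega
    simp only [List.getElem_take]
    exact hgood k (by omega) (by omega)
  have chain_drop : List.IsChain (fun a b => cF a b = false) (A.drop i) := by
    rw [List.isChain_iff_getElem]
    intro k hk
    have hk' : i + (k + 1) < A.length := by simp at hk; omega
    simp only [List.getElem_drop]
    have := hgood (i + k) (by omega) (by omega)
    simpa [Nat.add_assoc] using this
  -- decompositions
  have hviol : A[i]'hin ≤ A[i - 1]'hi1n := by
    rw [List.getD_eq_getElem A 0 hin, List.getD_eq_getElem A 0 hi1n] at hiv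
    exact hiv
  have hdrop_i : A.drop i = A[i]'hin :: A.drop (i + 1) := List.drop_eq_getElem_cons hin
  have hdrop_i1 : A.drop (i - 1) = A[i - 1]'hi1n :: A.drop i := by
    have e : i - 1 + 1 = i := by omega
    have := List.drop_eq_getElem_cons (l := A) hi1n
    rw [e] at this
    exact this
  have htake_i : A.take i = A.take (i - 1) ++ [A[i - 1]'hi1n] := by
    have e : i - 1 + 1 = i := by omega
    have := List.take_succ (l := A) (i := i - 1)
    rw [e, List.getElem?_eq_getElem hi1n] at this
    simpa using this
  have hA : A = A.take (i - 1) ++ A[i - 1]'hi1n :: A[i]'hin :: A.drop (i + 1) := by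
    conv_lhs => rw [← List.take_append_drop (i - 1) A]
    rw [hdrop_i1, hdrop_i]
  -- forward pass value
  have hd1_eq : (i = 1 ∨ A.getD (i - 2) 0 < A.getD i 0) → (pvPass cF A [] 0).2 = 1 := by
    intro hc
    by_cases h1 : i = 1
    · subst h1
      have hA' : A = A[0]'(by omega) :: A[1]'hin :: A.drop 2 := by
        simpa using hA
      rw [hA']
      apply key_one_a
      · exact decide_eq_true hviol
      · have : A[1]'hin :: A.drop 2 = A.drop 1 := by
          rw [hdrop_i]
        rw [this]
        exact chain_drop
    · have hge2 : 2 ≤ i := by omega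
      have hlt : A[i - 2]'hi2n < A[i]'hin := by
        rcases hc with hc | hc
        · omega
        · rw [List.getD_eq_getElem A 0 hi2n, List.getD_eq_getElem A 0 hin] at hc
          exact hc
      have htake_i1 : A.take (i - 1) = A.take (i - 2) ++ [A[i - 2]'hi2n] := by
        have e : i - 2 + 1 = i - 1 := by omega
        have := List.take_succ (l := A) (i := i - 2)
        rw [e, List.getElem?_eq_getElem hi2n] at this
        simpa using this
      have hA2 : A = (A.take (i - 2) ++ [A[i - 2]'hi2n, A[i - 1]'hi1n]) ++
          A[i]'hin :: A.drop (i + 1) := by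
        conv_lhs => rw [hA]
        rw [htake_i1]
        simp only [List.append_assoc, List.cons_append, List.singleton_append, List.nil_append]
      rw [hA2]
      apply key_one_b
      · have : A.take (i - 2) ++ [A[i - 2]'hi2n, A[i - 1]'hi1n] = A.take i := by
          rw [htake_i, htake_i1, List.append_assoc]
          rfl
        rw [this]
        exact chain_take
      · exact decide_eq_true hviol
      · exact decide_eq_false (by omega)
      · rw [← hdrop_i]
        exact chain_drop
  have hd1_ge : ¬(i = 1 ∨ A.getD (i - 2) 0 < A.getD i 0) → 2 ≤ (pvPass cF A [] 0).2 := by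
    intro hc
    push_neg at hc
    obtain ⟨h1, h2⟩ := hc
    have hge2 : 2 ≤ i := by omega
    have hle : A[i]'hin ≤ A[i - 2]'hi2n := by
      rw [List.getD_eq_getElem A 0 hi2n, List.getD_eq_getElem A 0 hin] at h2
      omega
    have htake_i1 : A.take (i - 1) = A.take (i - 2) ++ [A[i - 2]'hi2n] := by
      have e : i - 2 + 1 = i - 1 := by omega
      have := List.take_succ (l := A) (i := i - 2)
      rw [e, List.getElem?_eq_getElem hi2n] at this
      simpa using this
    have hA2 : A = (A.take (i - 2) ++ [A[i - 2]'hi2n, A[i - 1]'hi1n]) ++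
        A[i]'hin :: A.drop (i + 1) := by
      conv_lhs => rw [hA]
      rw [htake_i1]
      simp only [List.append_assoc, List.cons_append, List.singleton_append, List.nil_append]
    rw [hA2]
    apply key_two
    · have : A.take (i - 2) ++ [A[i - 2]'hi2n, A[i - 1]'hi1n] = A.take i := by
        rw [htake_i, htake_i1, List.append_assoc]
        rfl
      rw [this]
      exact chain_take
    · exact decide_eq_true hviol
    · exact decide_eq_true hle
  -- backward pass value
  have hrev : A.reverse = (A.drop i).reverse ++ A[i - 1]'hi1n :: (A.take (i - 1)).reverse := by
    conv_lhs => rw [hA]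
    simp
  have chain_xS : List.IsChain (fun a b => cB a b = false)
      (A[i - 1]'hi1n :: (A.take (i - 1)).reverse) := by
    have e : A[i - 1]'hi1n :: (A.take (i - 1)).reverse = (A.take i).reverse := by
      rw [htake_i]
      simp only [List.reverse_append, List.reverse_singleton, List.singleton_append]
    rw [e, chainB_rev]
    exact chain_take
  have hd2_eq : (i = A.length - 1 ∨ A.getD (i - 1) 0 < A.getD (i + 1) 0) →
      (pvPass cB A.reverse [] 0).2 = 1 := by
    intro hc
    by_cases h1 : i = A.length - 1
    · have hdropn : A.drop (i + 1) = [] := by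
        have : i + 1 = A.length := by omega
        rw [this, List.drop_length]
      have hrev2 : A.reverse = A[i]'hin :: A[i - 1]'hi1n :: (A.take (i - 1)).reverse := by
        rw [hrev, hdrop_i, hdropn]
        simp
      rw [hrev2]
      apply key_one_a
      · exact decide_eq_true hviol
      · exact chain_xS
    · have hi1n' : i + 1 < A.length := by omega
      have hlt : A[i - 1]'hi1n < A[i + 1]'hi1n' := by
        rcases hc with hc | hc
        · omega
        · rw [List.getD_eq_getElem A 0 hi1n, List.getD_eq_getElem A 0 hi1n'] at hc
          exact hc
      have hdrop_i2 : A.drop (i + 1) = A[i + 1]'hi1n' :: A.drop (i + 2) :=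
        List.drop_eq_getElem_cons hi1n'
      have hrev2 : A.reverse = ((A.drop (i + 2)).reverse ++ [A[i + 1]'hi1n', A[i]'hin]) ++
          A[i - 1]'hi1n :: (A.take (i - 1)).reverse := by
        conv_lhs => rw [hrev, hdrop_i, hdrop_i2]
        simp only [List.reverse_cons, List.append_assoc, List.singleton_append, List.cons_append, List.nil_append]
      rw [hrev2]
      apply key_one_b
      · have e : (A.drop (i + 2)).reverse ++ [A[i + 1]'hi1n', A[i]'hin]
            = (A.drop i).reverse := by
          rw [hdrop_i, hdrop_i2]
          simp only [List.reverse_cons, List.append_assoc, List.singleton_append, List.cons_append, List.nil_append]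
        rw [e, chainB_rev]
        exact chain_drop
      · exact decide_eq_true hviol
      · exact decide_eq_false (by omega)
      · exact chain_xS
  have hd2_ge : ¬(i = A.length - 1 ∨ A.getD (i - 1) 0 < A.getD (i + 1) 0) →
      2 ≤ (pvPass cB A.reverse [] 0).2 := by
    intro hc
    push_neg at hc
    obtain ⟨h1, h2⟩ := hc
    have hi1n' : i + 1 < A.length := by omega
    have hle : A[i + 1]'hi1n' ≤ A[i - 1]'hi1n := by
      rw [List.getD_eq_getElem A 0 hi1n, List.getD_eq_getElem A 0 hi1n'] at h2
      omega
    have hdrop_i2 : A.drop (i + 1) = A[i + 1]'hi1n' :: A.drop (i + 2) :=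
      List.drop_eq_getElem_cons hi1n'
    have hrev2 : A.reverse = ((A.drop (i + 2)).reverse ++ [A[i + 1]'hi1n', A[i]'hin]) ++
        A[i - 1]'hi1n :: (A.take (i - 1)).reverse := by
      conv_lhs => rw [hrev, hdrop_i, hdrop_i2]
      simp only [List.reverse_cons, List.append_assoc, List.singleton_append, List.cons_append, List.nil_append]
    rw [hrev2]
    apply key_two
    · have e : (A.drop (i + 2)).reverse ++ [A[i + 1]'hi1n', A[i]'hin]
          = (A.drop i).reverse := by
        rw [hdrop_i, hdrop_i2]
        simp only [List.reverse_cons, List.append_assoc, List.singleton_append, List.cons_append, List.nil_append]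
      rw [e, chainB_rev]
      exact chain_drop
    · exact decide_eq_true hviol
    · exact decide_eq_true hle
  -- assemble the boolean equality
  by_cases c1 : i = 1 ∨ A.getD (i - 2) 0 < A.getD i 0
  · have hd1 := hd1_eq c1
    have hmin : min (pvPass cF A [] 0).2 (pvPass cB A.reverse [] 0).2 ≤ 1 := by
      calc min (pvPass cF A [] 0).2 (pvPass cB A.reverse [] 0).2
          ≤ (pvPass cF A [] 0).2 := min_le_left _ _
        _ ≤ 1 := by rw [hd1]
    rw [decide_eq_true hmin]
    symm
    simp only [Bool.or_eq_true, decide_eq_true_eq]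
    tauto
  · by_cases c2 : i = A.length - 1 ∨ A.getD (i - 1) 0 < A.getD (i + 1) 0
    · have hd2 := hd2_eq c2
      have hmin : min (pvPass cF A [] 0).2 (pvPass cB A.reverse [] 0).2 ≤ 1 := by
        calc min (pvPass cF A [] 0).2 (pvPass cB A.reverse [] 0).2
            ≤ (pvPass cB A.reverse [] 0).2 := min_le_right _ _
          _ ≤ 1 := by rw [hd2]
      rw [decide_eq_true hmin]
      symm
      simp only [Bool.or_eq_true, decide_eq_true_eq]
      tauto
    · have g1 := hd1_ge c1
      have g2 := hd2_ge c2
      have hmin : ¬ (min (pvPass cF A [] 0).2 (pvPass cB A.reverse [] 0).2 ≤ 1) := by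
        rw [not_le]
        exact lt_min (by omega) (by omega)
      rw [decide_eq_false hmin]
      have n1 : i ≠ 1 := fun hx => c1 (Or.inl hx)
      have n2 : ¬ A.getD (i - 2) 0 < A.getD i 0 := fun hx => c1 (Or.inr hx)
      have n3 : i ≠ A.length - 1 := fun hx => c2 (Or.inl hx)
      have n4 : ¬ A.getD (i - 1) 0 < A.getD (i + 1) 0 := fun hx => c2 (Or.inr hx)
      simp [n1, n3]
      exact ⟨not_lt.mp n2, not_lt.mp n4⟩

-- ---- main equality ----

lemma main_eq (A : List Int) : canBeIncreasing A = canBeIncreasing_alt A := by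
  rcases hbad : pvBad A with _ | ⟨i, _ | ⟨j, t⟩⟩
  · exact case_nil A hbad
  · exact case_single A i hbad
  · exact case_two A i j t hbad

-- ===== VERDICT (by name: the statement is the Claim_ definition above) =====
theorem canBeIncreasing_spec : Claim_equal_canBeIncreasing := by
  intro A _
  unfold Spec_canBeIncreasing
  exact main_eq A
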